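-- pv_equiv track=rewrite | github.com/ekingungor/assignments | NLP - Word Segmentation w:o Spaces btw Words/separation.py | bottomUpTable
-- ===== SOURCE A (Python) =====
-- def bottomUpTable(entry, database):
--     n = len(entry)
--     separate = [[0 for x in range(n + 1)] for y in range(n + 1)]
--     point = [[0 for x in range(n + 1)] for y in range(n + 1)]
--     # all length of 1 substrings' cost points are got from the database
--     for x in range(n):
--         point[x][x + 1] = database.get(str(entry[x:x + 1]), 0)
--     # all length of more than 1 substrings' points are evaluated from the smaller sub strings and directly from
--     # the database.
--     for L in range(2, n + 1):
--         for i in range(n - L + 1):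
--             j = i + L
--             point[i][j] = 0
--             for k in range(i + 1, j):
--                 q = point[i][k] * point[k][j]
--                 if q > point[i][j]:
--                     point[i][j] = q
--                     separate[i][j] = k
--
--             q = database.get(str(entry[i:j]), 0)
--             if q > point[i][j]:
--                 point[i][j] = q
--                 separate[i][j] = 0
--
--     return separate
-- ===== SOURCE B (Python) =====
-- def bottomUpTable(entry, database):
--     n = len(entry)
--     def w(i, j):
--         return database.get(entry[i:j], 0)
--
--     memo = {}
--
--     def point(i, j):
--         if (i, j) in memo:
--             return memo[(i, j)]
--         if j - i == 1:
--             v = w(i, j)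
--         else:
--             best = 0
--             for k in range(i + 1, j):
--                 q = point(i, k) * point(k, j)
--                 if best < q:
--                     best = q
--             q = w(i, j)
--             v = q if best < q else best
--         memo[(i, j)] = v
--         return v
--
--     def split(i, j):
--         best, arg = 0, 0
--         for k in range(i + 1, j):
--             q = point(i, k) * point(k, j)
--             if best < q:
--                 best, arg = q, k
--         return 0 if best < w(i, j) else arg
--
--     return [[split(i, j) if i + 2 <= j else 0 for j in range(n + 1)]
--             for i in range(n + 1)]
-- ===== Notes on version B (the rewrite author's own statement) =====
-- stated objective: alternative
-- what changed: Replaces the in-place bottom-up 2D-table DP (nested L/i/k loops mutating point/separate lists) by a memoized top-down recursion computing interval values on demand, with the separate table produced afterwards as a pure comprehension of per-cell argmax scans.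
import Mathlib
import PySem

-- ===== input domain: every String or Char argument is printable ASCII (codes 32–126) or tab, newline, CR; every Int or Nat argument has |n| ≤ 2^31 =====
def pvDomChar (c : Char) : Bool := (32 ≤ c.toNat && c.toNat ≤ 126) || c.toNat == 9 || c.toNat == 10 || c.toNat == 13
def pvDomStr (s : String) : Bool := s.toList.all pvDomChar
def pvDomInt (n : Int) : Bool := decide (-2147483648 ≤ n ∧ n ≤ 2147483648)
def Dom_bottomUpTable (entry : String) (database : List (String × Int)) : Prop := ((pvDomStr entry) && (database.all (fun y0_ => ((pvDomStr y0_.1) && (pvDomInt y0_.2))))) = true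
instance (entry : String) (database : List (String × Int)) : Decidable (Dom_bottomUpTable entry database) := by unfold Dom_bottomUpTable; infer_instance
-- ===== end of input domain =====

-- B replaces A's in-place bottom-up 2D-table DP by a memoized top-down recursion for the
-- interval values plus a per-cell argmax comprehension for the split table (same O(n^3) work;
-- no speed claim).

-- ===== PORT A =====
-- shared helpers: dict lookup (assoc list, first match per the type convention) and entry[i:j]
def dbGet (database : List (String × Int)) (s : String) : Int :=
  ((database.find? (fun p => p.1 == s)).map (fun p => p.2)).getD 0

-- str(entry[i:j]) for 0 ≤ i, j: exact Python slice (PySem.List.slice on the char list)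
def subKey (cs : List Char) (i j : Nat) : String :=
  String.ofList (PySem.List.slice cs (some (i : Int)) (some (j : Int)))

-- database.get(entry[i:j], 0) as a function of the two cut points
def wLook (cs : List Char) (database : List (String × Int)) : Nat → Nat → Int :=
  fun i j => dbGet database (subKey cs i j)

-- t[i][j] and t[i][j] = v on the (n+1)×(n+1) tables (all indices produced by A's ranges are
-- in range, so List.getD/List.set are exact)
def get2 (t : List (List Int)) (i j : Nat) : Int := (t.getD i []).getD j 0
def set2 (t : List (List Int)) (i j : Nat) (v : Int) : List (List Int) :=
  t.set i ((t.getD i []).set j v)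

-- [[0 for x in range(n+1)] for y in range(n+1)]
def mk0 (n : Nat) : List (List Int) :=
  (List.range (n+1)).map (fun _ => (List.range (n+1)).map (fun _ => (0 : Int)))

-- body of A's 'for k in range(i+1, j)' loop (state = (separate, point))
def stepK (i j : Nat) (SP : List (List Int) × List (List Int)) (k : Nat) :
    List (List Int) × List (List Int) :=
  let q := get2 SP.2 i k * get2 SP.2 k j
  if get2 SP.2 i j < q then (set2 SP.1 i j (k : Int), set2 SP.2 i j q) else SP

-- body of A's 'for i in range(n-L+1)' loop
def stepI (g : Nat → Nat → Int) (L : Nat) (SP : List (List Int) × List (List Int)) (i : Nat) :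
    List (List Int) × List (List Int) :=
  let j := i + L
  let SP1 := (SP.1, set2 SP.2 i j 0)
  let SP2 := (List.range' (i+1) (L-1)).foldl (stepK i j) SP1   -- range(i+1, j), j = i+L
  let q := g i j
  if get2 SP2.2 i j < q then (set2 SP2.1 i j 0, set2 SP2.2 i j q) else SP2

-- body of A's 'for L in range(2, n+1)' loop
def stepL (g : Nat → Nat → Int) (n : Nat) (SP : List (List Int) × List (List Int)) (L : Nat) :
    List (List Int) × List (List Int) :=
  (List.range (n - L + 1)).foldl (stepI g L) SP

def bottomUpTable (entry : String) (database : List (String × Int)) : List (List Int) :=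
  let cs := entry.toList
  let n := cs.length
  let g := wLook cs database
  let separate := mk0 n
  let point := mk0 n
  let point := (List.range n).foldl (fun P x => set2 P x (x+1) (g x (x+1))) point
  ((List.range' 2 (n-1)).foldl (stepL g n) (separate, point)).1   -- range(2, n+1)

-- ===== PORT B =====
-- Source B's memo dict, keyed by (i, j)
abbrev BMemo := PySem.Dict (Nat × Nat) Int

-- Source B's 'point(i, j)': memoized recursion on the interval.  The fuel argument (any value
-- > j - i, supplied by the pointM wrapper below) only makes the recursion structural; it is
-- never exhausted on the calls the port makes.
def pointMF (g : Nat → Nat → Int) (fuel : Nat) (memo : BMemo) (i j : Nat) : Int × BMemo :=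
  match fuel with
  | 0 => (0, memo)
  | fuel+1 =>
    match memo.get? (i, j) with
    | some v => (v, memo)
    | none =>
      let vm :=
        if j - i = 1 then (g i j, memo)
        else
          let st := (List.range' (i+1) (j - i - 1)).foldl   -- range(i+1, j)
            (fun (st : Int × BMemo) k =>
              let p1m := pointMF g fuel st.2 i k
              let p2m := pointMF g fuel p1m.2 k j
              let q := p1m.1 * p2m.1
              if st.1 < q then (q, p2m.2) else (st.1, p2m.2)) (0, memo)
          let q := g i j
          (if st.1 < q then q else st.1, st.2)
      (vm.1, vm.2.insert (i, j) vm.1)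

def pointM (g : Nat → Nat → Int) (memo : BMemo) (i j : Nat) : Int × BMemo :=
  pointMF g (j - i + 1) memo i j

-- Source B's 'split(i, j)' (state = (best, arg, memo))
def splitM (g : Nat → Nat → Int) (memo : BMemo) (i j : Nat) : Int × BMemo :=
  let st := (List.range' (i+1) (j - i - 1)).foldl   -- range(i+1, j)
    (fun (st : Int × Int × BMemo) k =>
      let p1m := pointM g st.2.2 i k
      let p2m := pointM g p1m.2 k j
      let q := p1m.1 * p2m.1
      if st.1 < q then (q, (k : Int), p2m.2) else (st.1, st.2.1, p2m.2)) (0, 0, memo)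
  if st.1 < g i j then (0, st.2.2) else (st.2.1, st.2.2)

def bottomUpTable_alt (entry : String) (database : List (String × Int)) : List (List Int) :=
  let cs := entry.toList
  let n := cs.length
  let g := wLook cs database
  -- the nested comprehension, evaluated left-to-right threading the shared memo
  (((List.range (n+1)).foldl (fun (acc : List (List Int) × BMemo) i =>
      let rowm := (List.range (n+1)).foldl (fun (rm : List Int × BMemo) j =>
          if i + 2 ≤ j then
            let am := splitM g rm.2 i j
            (rm.1 ++ [am.1], am.2)
          else (rm.1 ++ [(0 : Int)], rm.2)) ([], acc.2)
      (acc.1 ++ [rowm.1], rowm.2)) ([], PySem.Dict.empty)).1)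

-- ===== PRECONDITION & SPEC =====
def Spec_bottomUpTable (entry : String) (database : List (String × Int)) (out : List (List Int)) : Prop := out = bottomUpTable_alt entry database
instance (entry : String) (database : List (String × Int)) (out : List (List Int)) : Decidable (Spec_bottomUpTable entry database out) := by unfold Spec_bottomUpTable; infer_instance

-- ===== CLAIM (what is proved, stated in full; the proofs are below) =====
def Claim_equal_bottomUpTable : Prop := ∀ (entry : String) (database : List (String × Int)), Dom_bottomUpTable entry database → Spec_bottomUpTable entry database (bottomUpTable entry database)

-- ===== LEMMAS AND PROOFS =====

-- pure interval value: what both point tables compute (fuel-indexed; any fuel > j - i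
-- gives the same value, see ptPF_irrel)
def ptPF (g : Nat → Nat → Int) (fuel : Nat) (i j : Nat) : Int :=
  match fuel with
  | 0 => 0
  | fuel+1 =>
    if j - i = 1 then g i j
    else
      let best := (List.range' (i+1) (j - i - 1)).foldl
        (fun best k => let q := ptPF g fuel i k * ptPF g fuel k j; if best < q then q else best) 0
      let q := g i j
      if best < q then q else best

def ptP (g : Nat → Nat → Int) (i j : Nat) : Int := ptPF g (j - i + 1) i j

theorem ptPF_irrel (g : Nat → Nat → Int) :
    ∀ (f1 : Nat), ∀ (f2 i j : Nat), j - i < f1 → j - i < f2 → ptPF g f1 i j = ptPF g f2 i j := by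
  intro f1
  induction f1 with
  | zero => intro f2 i j h1 _; omega
  | succ f1 ih =>
    intro f2 i j h1 h2
    match f2, h2 with
    | f2+1, h2 =>
      simp only [ptPF]
      by_cases hone : j - i = 1
      · rw [if_pos hone, if_pos hone]
      · rw [if_neg hone, if_neg hone]
        have hfold : (List.range' (i+1) (j - i - 1)).foldl
            (fun best k => let q := ptPF g f1 i k * ptPF g f1 k j; if best < q then q else best) 0 =
            (List.range' (i+1) (j - i - 1)).foldl
            (fun best k => let q := ptPF g f2 i k * ptPF g f2 k j; if best < q then q else best) 0 := by
          apply PySem.List.foldl_congr_mem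
          intro acc x hx
          have hb := List.mem_range'_1.mp hx
          rw [ih f2 i x (by omega) (by omega), ih f2 x j (by omega) (by omega)]
        rw [hfold]

-- pure (best, arg) pair for one cell
def spP (g : Nat → Nat → Int) (i j : Nat) : Int × Int :=
  (List.range' (i+1) (j - i - 1)).foldl
    (fun ba k => let q := ptP g i k * ptP g k j; if ba.1 < q then (q, (k : Int)) else ba) (0, 0)

-- pure separate[i][j]
def sepP (g : Nat → Nat → Int) (i j : Nat) : Int :=
  if (spP g i j).1 < g i j then 0 else (spP g i j).2

-- table of a function
def mkT (n : Nat) (f : Nat → Nat → Int) : List (List Int) :=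
  (List.range (n+1)).map (fun i => (List.range (n+1)).map (fun j => f i j))

theorem mkT_congr {n : Nat} {f f' : Nat → Nat → Int}
    (h : ∀ a b, a ≤ n → b ≤ n → f a b = f' a b) : mkT n f = mkT n f' := by
  unfold mkT
  apply List.map_congr_left
  intro a ha
  apply List.map_congr_left
  intro b hb
  exact h a b (Nat.lt_succ_iff.mp (List.mem_range.mp ha)) (Nat.lt_succ_iff.mp (List.mem_range.mp hb))

theorem get2_mkT {n : Nat} (f : Nat → Nat → Int) {i j : Nat} (hi : i ≤ n) (hj : j ≤ n) :
    get2 (mkT n f) i j = f i j := by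
  have hi' : i < n + 1 := by omega
  have hj' : j < n + 1 := by omega
  simp [get2, mkT, List.getD_eq_getElem?_getD, hi', hj']

theorem set2_mkT {n : Nat} (f : Nat → Nat → Int) {i j : Nat} (hi : i ≤ n) (hj : j ≤ n) (v : Int) :
    set2 (mkT n f) i j v = mkT n (fun a b => if a = i ∧ b = j then v else f a b) := by
  have hi' : i < n + 1 := by omega
  have hj' : j < n + 1 := by omega
  unfold set2 mkT
  apply List.ext_getElem
  · simp
  intro a ha _
  simp only [List.length_set, List.length_map, List.length_range] at ha
  by_cases hai : a = i
  · subst hai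
    rw [List.getElem_set_self (by simpa using ha)]
    apply List.ext_getElem
    · simp [List.getD_eq_getElem?_getD, hi']
    intro b hb _
    simp only [List.getD_eq_getElem?_getD, List.getElem?_map, List.getElem?_range, hi'] at *
    by_cases hbj : b = j
    · subst hbj
      rw [List.getElem_set_self]
      simp [List.getElem_map, List.getElem_range]
    · rw [List.getElem_set_ne (by omega)]
      simp_all [List.getElem_map, List.getElem_range]
  · rw [List.getElem_set_ne (by omega)]
    simp [List.getElem_map, List.getElem_range, hai]

theorem mk0_eq (n : Nat) : mk0 n = mkT n (fun _ _ => 0) := rfl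

-- unfolding ptP without the attach
theorem ptP_eq (g : Nat → Nat → Int) (i j : Nat) :
    ptP g i j =
      if j - i = 1 then g i j
      else
        let best := (List.range' (i+1) (j - i - 1)).foldl
          (fun best k => let q := ptP g i k * ptP g k j; if best < q then q else best) 0
        let q := g i j
        if best < q then q else best := by
  rw [ptP]
  simp only [ptPF]
  by_cases hone : j - i = 1
  · rw [if_pos hone, if_pos hone]
  · rw [if_neg hone, if_neg hone]
    have hfold : (List.range' (i+1) (j - i - 1)).foldl
        (fun best k => let q := ptPF g (j - i) i k * ptPF g (j - i) k j; if best < q then q else best) 0 =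
        (List.range' (i+1) (j - i - 1)).foldl
        (fun best k => let q := ptP g i k * ptP g k j; if best < q then q else best) 0 := by
      apply PySem.List.foldl_congr_mem
      intro acc x hx
      have hb := List.mem_range'_1.mp hx
      rw [show ptP g i x = ptPF g (x - i + 1) i x from rfl,
        show ptP g x j = ptPF g (j - x + 1) x j from rfl,
        ptPF_irrel g (j - i) (x - i + 1) i x (by omega) (by omega),
        ptPF_irrel g (j - i) (j - x + 1) x j (by omega) (by omega)]
    rw [hfold]

theorem pairfold_fst (h : Nat → Int) (l : List Nat) :
    ∀ (b a : Int), (l.foldl (fun ba k => if ba.1 < h k then (h k, (k : Int)) else ba) (b, a)).1 =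
      l.foldl (fun best k => if best < h k then h k else best) b := by
  induction l with
  | nil => intro b a; rfl
  | cons x xs ih =>
    intro b a
    simp only [List.foldl_cons]
    by_cases hc : b < h x <;> simp [hc, ih]

-- first component of the pair fold is the plain best fold
theorem spP_fst (g : Nat → Nat → Int) (i j : Nat) :
    (spP g i j).1 = (List.range' (i+1) (j - i - 1)).foldl
      (fun best k => let q := ptP g i k * ptP g k j; if best < q then q else best) 0 := by
  show (let l := List.range' (i+1) (j - i - 1); (l.foldl
      (fun ba k => let q := ptP g i k * ptP g k j; if ba.1 < q then (q, (k : Int)) else ba) ((0:Int), (0:Int))).1) = _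
  exact pairfold_fst (fun k => ptP g i k * ptP g k j) _ 0 0

-- ===== A-side invariants =====

theorem loop1_eq (g : Nat → Nat → Int) (n : Nat) :
    ∀ m, m ≤ n →
      (List.range m).foldl (fun P x => set2 P x (x+1) (g x (x+1))) (mkT n (fun _ _ => 0)) =
        mkT n (fun a b => if a < m ∧ b = a + 1 then g a b else 0) := by
  intro m
  induction m with
  | zero =>
    intro _
    simp only [List.range_zero, List.foldl_nil]
    exact mkT_congr (by intro a b _ _; simp)
  | succ m ih =>
    intro hm
    rw [List.range_succ, List.foldl_append, ih (by omega), List.foldl_cons, List.foldl_nil,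
      set2_mkT _ (by omega) (by omega)]
    apply mkT_congr
    intro a b _ _
    by_cases h1 : a = m ∧ b = m + 1
    · obtain ⟨rfl, rfl⟩ := h1; simp
    · rw [if_neg h1]
      by_cases h2 : a < m ∧ b = a + 1
      · rw [if_pos h2, if_pos (by omega)]
      · rw [if_neg h2, if_neg (by omega)]

-- the k-loop for one cell (i, j)
theorem kfold_eq (g : Nat → Nat → Int) (n i j : Nat) (s0 p0 : Nat → Nat → Int)
    (hj : j ≤ n) (hij : i < j)
    (hs : s0 i j = 0) (hp : p0 i j = 0)
    (hread : ∀ k, i < k → k < j → p0 i k = ptP g i k ∧ p0 k j = ptP g k j) :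
    ∀ m, i + m < j →
      (List.range' (i+1) m).foldl (stepK i j) (mkT n s0, mkT n p0) =
        (mkT n (fun a b => if a = i ∧ b = j then
              ((List.range' (i+1) m).foldl
                (fun ba k => let q := ptP g i k * ptP g k j; if ba.1 < q then (q, (k : Int)) else ba) (0, 0)).2
            else s0 a b),
         mkT n (fun a b => if a = i ∧ b = j then
              ((List.range' (i+1) m).foldl
                (fun ba k => let q := ptP g i k * ptP g k j; if ba.1 < q then (q, (k : Int)) else ba) (0, 0)).1
            else p0 a b)) := by
  intro m
  induction m with
  | zero =>
    intro _
    simp only [List.range'_zero, List.foldl_nil, Prod.mk.injEq]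
    constructor
    · exact mkT_congr (by intro a b _ _; by_cases h : a = i ∧ b = j
                          · obtain ⟨rfl, rfl⟩ := h; simp [hs]
                          · simp [h])
    · exact mkT_congr (by intro a b _ _; by_cases h : a = i ∧ b = j
                          · obtain ⟨rfl, rfl⟩ := h; simp [hp]
                          · simp [h])
  | succ m ih =>
    intro hm
    have hkm : i + 1 + m < j := by omega
    rw [List.range'_1_concat, List.foldl_append, List.foldl_append, ih (by omega),
      List.foldl_cons, List.foldl_nil, List.foldl_cons, List.foldl_nil]
    set Pm := (List.range' (i+1) m).foldl
      (fun ba k => let q := ptP g i k * ptP g k j; if ba.1 < q then (q, (k : Int)) else ba)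
      ((0 : Int), (0 : Int)) with hPm
    simp only [stepK]
    rw [get2_mkT _ (by omega) (by omega), get2_mkT _ (by omega) (by omega),
      get2_mkT _ (by omega) (by omega)]
    simp only [true_and, and_true, if_true,
      if_neg (show ¬ i+1+m = j by omega), if_neg (show ¬ i+1+m = i by omega),
      (hread (i+1+m) (by omega) (by omega)).1, (hread (i+1+m) (by omega) (by omega)).2]
    by_cases hc : Pm.1 < ptP g i (i+1+m) * ptP g (i+1+m) j
    · simp only [hc, if_true, set2_mkT _ (show i ≤ n by omega) (show j ≤ n from hj),
        Prod.mk.injEq]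
      constructor
      · apply mkT_congr
        intro a b _ _
        by_cases h : a = i ∧ b = j <;> simp [h]
      · apply mkT_congr
        intro a b _ _
        by_cases h : a = i ∧ b = j <;> simp [h]
    · simp only [hc, if_false]

-- partially processed tables
def pMid (g : Nat → Nat → Int) (n L i : Nat) (a b : Nat) : Int :=
  if a < b ∧ b ≤ n ∧ (b - a < L ∨ (b - a = L ∧ a < i)) then ptP g a b else 0
def sMid (g : Nat → Nat → Int) (n L i : Nat) (a b : Nat) : Int :=
  if a + 2 ≤ b ∧ b ≤ n ∧ (b - a < L ∨ (b - a = L ∧ a < i)) then sepP g a b else 0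

theorem stepI_eq (g : Nat → Nat → Int) (n L i : Nat) (hL2 : 2 ≤ L) (hiL : i + L ≤ n) :
    stepI g L (mkT n (sMid g n L i), mkT n (pMid g n L i)) i =
      (mkT n (sMid g n L (i+1)), mkT n (pMid g n L (i+1))) := by
  have hj : i + L ≤ n := hiL
  have hij : i < i + L := by omega
  simp only [stepI]
  rw [set2_mkT _ (by omega) (by omega)]
  have hp0 : (fun a b => if a = i ∧ b = i + L then (0:Int) else pMid g n L i a b) = pMid g n L i := by
    funext a b
    by_cases h : a = i ∧ b = i + L
    · obtain ⟨ha, hb⟩ := h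
      rw [ha, hb, if_pos ⟨rfl, rfl⟩, pMid, if_neg (by omega)]
    · rw [if_neg h]
  rw [hp0]
  have hkf := kfold_eq g n i (i+L) (sMid g n L i) (pMid g n L i) hj hij
    (by rw [sMid, if_neg (by omega)]) (by rw [pMid, if_neg (by omega)])
    (by intro k hk1 hk2
        constructor
        · rw [pMid, if_pos (by omega)]
        · rw [pMid, if_pos (by omega)])
    (L-1) (by omega)
  rw [hkf]
  have hsp : spP g i (i+L) = (List.range' (i+1) (L-1)).foldl
      (fun ba k => let q := ptP g i k * ptP g k (i+L); if ba.1 < q then (q, (k : Int)) else ba)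
      ((0:Int), (0:Int)) := by
    unfold spP
    rw [show i + L - i - 1 = L - 1 by omega]
  rw [← hsp]
  rw [get2_mkT _ (by omega) (by omega)]
  simp only [and_true, if_true]
  have hpt : ptP g i (i+L) = if (spP g i (i+L)).1 < g i (i+L) then g i (i+L) else (spP g i (i+L)).1 := by
    rw [ptP_eq, if_neg (by omega), spP_fst]
  have hsep : sepP g i (i+L) = if (spP g i (i+L)).1 < g i (i+L) then 0 else (spP g i (i+L)).2 := rfl
  by_cases hc : (spP g i (i+L)).1 < g i (i+L)
  · rw [if_pos hc, set2_mkT _ (show i ≤ n by omega) (show i + L ≤ n from hj),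
      set2_mkT _ (show i ≤ n by omega) (show i + L ≤ n from hj), Prod.mk.injEq]
    constructor
    · apply mkT_congr
      intro a b _ _
      by_cases h : a = i ∧ b = i + L
      · obtain ⟨ha, hb⟩ := h
        rw [ha, hb, if_pos ⟨rfl, rfl⟩, sMid, if_pos (by omega), hsep, if_pos hc]
      · rw [if_neg h, if_neg h, sMid, sMid]
        by_cases h2 : a + 2 ≤ b ∧ b ≤ n ∧ (b - a < L ∨ (b - a = L ∧ a < i))
        · rw [if_pos h2, if_pos (by omega)]
        · rw [if_neg h2, if_neg (by intro hcon; apply h2; omega)]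
    · apply mkT_congr
      intro a b _ _
      by_cases h : a = i ∧ b = i + L
      · obtain ⟨ha, hb⟩ := h
        rw [ha, hb, if_pos ⟨rfl, rfl⟩, pMid, if_pos (by omega), hpt, if_pos hc]
      · rw [if_neg h, if_neg h, pMid, pMid]
        by_cases h2 : a < b ∧ b ≤ n ∧ (b - a < L ∨ (b - a = L ∧ a < i))
        · rw [if_pos h2, if_pos (by omega)]
        · rw [if_neg h2, if_neg (by intro hcon; apply h2; omega)]
  · rw [if_neg hc, Prod.mk.injEq]
    constructor
    · apply mkT_congr
      intro a b _ _
      by_cases h : a = i ∧ b = i + L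
      · obtain ⟨ha, hb⟩ := h
        rw [ha, hb, if_pos ⟨rfl, rfl⟩, sMid, if_pos (by omega), hsep, if_neg hc]
      · rw [if_neg h, sMid, sMid]
        by_cases h2 : a + 2 ≤ b ∧ b ≤ n ∧ (b - a < L ∨ (b - a = L ∧ a < i))
        · rw [if_pos h2, if_pos (by omega)]
        · rw [if_neg h2, if_neg (by intro hcon; apply h2; omega)]
    · apply mkT_congr
      intro a b _ _
      by_cases h : a = i ∧ b = i + L
      · obtain ⟨ha, hb⟩ := h
        rw [ha, hb, if_pos ⟨rfl, rfl⟩, pMid, if_pos (by omega), hpt, if_neg hc]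
      · rw [if_neg h, pMid, pMid]
        by_cases h2 : a < b ∧ b ≤ n ∧ (b - a < L ∨ (b - a = L ∧ a < i))
        · rw [if_pos h2, if_pos (by omega)]
        · rw [if_neg h2, if_neg (by intro hcon; apply h2; omega)]


theorem stepL_eq (g : Nat → Nat → Int) (n L : Nat) (hL2 : 2 ≤ L) (hLn : L ≤ n) :
    stepL g n (mkT n (sMid g n L 0), mkT n (pMid g n L 0)) L =
      (mkT n (sMid g n (L+1) 0), mkT n (pMid g n (L+1) 0)) := by
  have aux : ∀ t, t ≤ n - L + 1 →
      (List.range t).foldl (stepI g L) (mkT n (sMid g n L 0), mkT n (pMid g n L 0)) =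
        (mkT n (sMid g n L t), mkT n (pMid g n L t)) := by
    intro t
    induction t with
    | zero => intro _; simp
    | succ t ih =>
      intro ht
      rw [List.range_succ, List.foldl_append, ih (by omega), List.foldl_cons, List.foldl_nil,
        stepI_eq g n L t hL2 (by omega)]
  rw [stepL, aux (n - L + 1) le_rfl, Prod.mk.injEq]
  constructor
  · apply mkT_congr
    intro a b _ hb
    rw [sMid, sMid]
    by_cases h2 : a + 2 ≤ b ∧ b ≤ n ∧ (b - a < L ∨ (b - a = L ∧ a < n - L + 1))
    · rw [if_pos h2, if_pos (by omega)]
    · rw [if_neg h2, if_neg (by intro hcon; apply h2; omega)]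
  · apply mkT_congr
    intro a b _ hb
    rw [pMid, pMid]
    by_cases h2 : a < b ∧ b ≤ n ∧ (b - a < L ∨ (b - a = L ∧ a < n - L + 1))
    · rw [if_pos h2, if_pos (by omega)]
    · rw [if_neg h2, if_neg (by intro hcon; apply h2; omega)]

theorem Lfold_eq (g : Nat → Nat → Int) (n : Nat) :
    ∀ m, m ≤ n - 1 →
      (List.range' 2 m).foldl (stepL g n) (mkT n (sMid g n 2 0), mkT n (pMid g n 2 0)) =
        (mkT n (sMid g n (2+m) 0), mkT n (pMid g n (2+m) 0)) := by
  intro m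
  induction m with
  | zero => intro _; simp
  | succ m ih =>
    intro hm
    rw [List.range'_1_concat, List.foldl_append, ih (by omega), List.foldl_cons, List.foldl_nil,
      stepL_eq g n (2+m) (by omega) (by omega)]
    rw [show 2 + m + 1 = 2 + (m+1) by omega]

theorem A_eq (entry : String) (database : List (String × Int)) :
    bottomUpTable entry database =
      mkT entry.toList.length
        (fun i j => if i + 2 ≤ j then sepP (wLook entry.toList database) i j else 0) := by
  set cs := entry.toList with hcs
  set n := cs.length with hn
  set g := wLook cs database with hg
  simp only [bottomUpTable, mk0_eq, ← hcs, ← hn, ← hg]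
  rw [loop1_eq g n n le_rfl]
  have h1 : mkT n (fun _ _ => (0:Int)) = mkT n (sMid g n 2 0) := by
    apply mkT_congr
    intro a b _ _
    rw [sMid, if_neg (by omega)]
  have h2 : mkT n (fun a b => if a < n ∧ b = a + 1 then g a b else 0) = mkT n (pMid g n 2 0) := by
    apply mkT_congr
    intro a b _ _
    rw [pMid]
    by_cases h : a < n ∧ b = a + 1
    · rw [if_pos h, if_pos (by omega), ptP_eq, if_pos (by omega), h.2]
    · rw [if_neg h, if_neg (by intro hcon; apply h; omega)]
  rw [h1, h2, Lfold_eq g n (n-1) le_rfl]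
  apply mkT_congr
  intro a b _ hb
  rw [sMid]
  by_cases h : a + 2 ≤ b
  · rw [if_pos (by omega), if_pos h]
  · rw [if_neg (by omega), if_neg h]

-- ===== B-side: memo correctness =====

def MemoInv (g : Nat → Nat → Int) (memo : BMemo) : Prop :=
  ∀ a b v, memo.get? (a, b) = some v → v = ptP g a b

theorem pointMF_correct (g : Nat → Nat → Int) :
    ∀ (fuel : Nat), ∀ (i j : Nat), j - i < fuel → ∀ memo, MemoInv g memo →
      (pointMF g fuel memo i j).1 = ptP g i j ∧ MemoInv g (pointMF g fuel memo i j).2 := by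
  intro fuel
  induction fuel with
  | zero => intro i j hd; omega
  | succ fuel ih =>
    intro i j hd memo h
    simp only [pointMF]
    cases hres : memo.get? (i, j) with
    | some v =>
      exact ⟨h i j v hres, h⟩
    | none =>
      have hins : ∀ (m1 : BMemo), MemoInv g m1 → ∀ (v : Int), v = ptP g i j →
          MemoInv g (m1.insert (i, j) v) := by
        intro m1 hm1 v hv a b v' hv'
        rw [PySem.Dict.get?_insert] at hv'
        by_cases hab : (a, b) = (i, j)
        · rw [if_pos hab] at hv'
          injection hab with h1 h2
          injection hv' with h3
          rw [← h3, hv, h1, h2]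
        · rw [if_neg hab] at hv'
          exact hm1 a b v' hv'
      by_cases hone : j - i = 1
      · simp only [if_pos hone]
        exact ⟨by rw [ptP_eq, if_pos hone], hins memo h _ (by rw [ptP_eq, if_pos hone])⟩
      · simp only [if_neg hone]
        have aux : ∀ (l : List Nat), (∀ k ∈ l, i < k ∧ k < j) → ∀ (b : Int) (m0 : BMemo), MemoInv g m0 →
            (l.foldl (fun (st : Int × BMemo) k =>
              let p1m := pointMF g fuel st.2 i k
              let p2m := pointMF g fuel p1m.2 k j
              let q := p1m.1 * p2m.1
              if st.1 < q then (q, p2m.2) else (st.1, p2m.2)) (b, m0)).1 =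
              l.foldl (fun best k => let q := ptP g i k * ptP g k j; if best < q then q else best) b ∧
            MemoInv g (l.foldl (fun (st : Int × BMemo) k =>
              let p1m := pointMF g fuel st.2 i k
              let p2m := pointMF g fuel p1m.2 k j
              let q := p1m.1 * p2m.1
              if st.1 < q then (q, p2m.2) else (st.1, p2m.2)) (b, m0)).2 := by
          intro l
          induction l with
          | nil => intro _ b m0 hm; exact ⟨rfl, hm⟩
          | cons x xs ihl =>
            intro hmem b m0 hm
            obtain ⟨hx1, hx2⟩ := hmem x (List.mem_cons_self)
            have h1 := ih i x (by omega) m0 hm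
            have h2 := ih x j (by omega) (pointMF g fuel m0 i x).2 h1.2
            simp only [List.foldl_cons, h1.1, h2.1]
            by_cases hc : b < ptP g i x * ptP g x j
            · simp only [hc, if_true]
              exact ihl (fun k hk => hmem k (List.mem_cons_of_mem _ hk)) _ _ h2.2
            · simp only [hc, if_false]
              exact ihl (fun k hk => hmem k (List.mem_cons_of_mem _ hk)) _ _ h2.2
        have hmem : ∀ k ∈ List.range' (i+1) (j - i - 1), i < k ∧ k < j := by
          intro k hk
          have := List.mem_range'_1.mp hk
          omega
        have hmain := aux (List.range' (i+1) (j - i - 1)) hmem 0 memo h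
        constructor
        · show (if ((List.range' (i+1) (j - i - 1)).foldl
                (fun (st : Int × BMemo) k =>
                  let p1m := pointMF g fuel st.2 i k
                  let p2m := pointMF g fuel p1m.2 k j
                  let q := p1m.1 * p2m.1
                  if st.1 < q then (q, p2m.2) else (st.1, p2m.2)) (0, memo)).1 < g i j then g i j
              else ((List.range' (i+1) (j - i - 1)).foldl
                (fun (st : Int × BMemo) k =>
                  let p1m := pointMF g fuel st.2 i k
                  let p2m := pointMF g fuel p1m.2 k j
                  let q := p1m.1 * p2m.1
                  if st.1 < q then (q, p2m.2) else (st.1, p2m.2)) (0, memo)).1) = ptP g i j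
          rw [hmain.1, ptP_eq, if_neg hone]
        · apply hins _ hmain.2
          show (if ((List.range' (i+1) (j - i - 1)).foldl
                (fun (st : Int × BMemo) k =>
                  let p1m := pointMF g fuel st.2 i k
                  let p2m := pointMF g fuel p1m.2 k j
                  let q := p1m.1 * p2m.1
                  if st.1 < q then (q, p2m.2) else (st.1, p2m.2)) (0, memo)).1 < g i j then g i j
              else ((List.range' (i+1) (j - i - 1)).foldl
                (fun (st : Int × BMemo) k =>
                  let p1m := pointMF g fuel st.2 i k
                  let p2m := pointMF g fuel p1m.2 k j
                  let q := p1m.1 * p2m.1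
                  if st.1 < q then (q, p2m.2) else (st.1, p2m.2)) (0, memo)).1) = ptP g i j
          rw [hmain.1, ptP_eq, if_neg hone]

theorem pointM_correct (g : Nat → Nat → Int) (i j : Nat) (memo : BMemo) (h : MemoInv g memo) :
    (pointM g memo i j).1 = ptP g i j ∧ MemoInv g (pointM g memo i j).2 :=
  pointMF_correct g (j - i + 1) i j (by omega) memo h

theorem splitM_correct (g : Nat → Nat → Int) (i j : Nat) (memo : BMemo) (h : MemoInv g memo) :
    (splitM g memo i j).1 = sepP g i j ∧ MemoInv g (splitM g memo i j).2 := by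
  have aux : ∀ (l : List Nat), (∀ k ∈ l, i < k ∧ k < j) →
      ∀ (b a : Int) (m0 : BMemo), MemoInv g m0 →
      (l.foldl (fun (st : Int × Int × BMemo) k =>
          let p1m := pointM g st.2.2 i k
          let p2m := pointM g p1m.2 k j
          let q := p1m.1 * p2m.1
          if st.1 < q then (q, (k : Int), p2m.2) else (st.1, st.2.1, p2m.2)) (b, a, m0)).1 =
        (l.foldl (fun ba k => let q := ptP g i k * ptP g k j;
          if ba.1 < q then (q, (k : Int)) else ba) (b, a)).1 ∧
      (l.foldl (fun (st : Int × Int × BMemo) k =>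
          let p1m := pointM g st.2.2 i k
          let p2m := pointM g p1m.2 k j
          let q := p1m.1 * p2m.1
          if st.1 < q then (q, (k : Int), p2m.2) else (st.1, st.2.1, p2m.2)) (b, a, m0)).2.1 =
        (l.foldl (fun ba k => let q := ptP g i k * ptP g k j;
          if ba.1 < q then (q, (k : Int)) else ba) (b, a)).2 ∧
      MemoInv g (l.foldl (fun (st : Int × Int × BMemo) k =>
          let p1m := pointM g st.2.2 i k
          let p2m := pointM g p1m.2 k j
          let q := p1m.1 * p2m.1
          if st.1 < q then (q, (k : Int), p2m.2) else (st.1, st.2.1, p2m.2)) (b, a, m0)).2.2 := by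
    intro l
    induction l with
    | nil => intro _ b a m0 hm; exact ⟨rfl, rfl, hm⟩
    | cons x xs ihl =>
      intro hmem b a m0 hm
      obtain ⟨hx1, hx2⟩ := hmem x (List.mem_cons_self)
      have h1 := pointM_correct g i x m0 hm
      have h2 := pointM_correct g x j (pointM g m0 i x).2 h1.2
      simp only [List.foldl_cons, h1.1, h2.1]
      by_cases hc : b < ptP g i x * ptP g x j
      · simp only [hc, if_true]
        exact ihl (fun k hk => hmem k (List.mem_cons_of_mem _ hk)) _ _ _ h2.2
      · simp only [hc, if_false]
        exact ihl (fun k hk => hmem k (List.mem_cons_of_mem _ hk)) _ _ _ h2.2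
  have hmem : ∀ k ∈ List.range' (i+1) (j - i - 1), i < k ∧ k < j := by
    intro k hk
    have := List.mem_range'_1.mp hk
    omega
  have hmain := aux (List.range' (i+1) (j - i - 1)) hmem 0 0 memo h
  have hpure : (List.range' (i+1) (j - i - 1)).foldl (fun ba k => let q := ptP g i k * ptP g k j;
      if ba.1 < q then (q, (k : Int)) else ba) ((0 : Int), (0 : Int)) = spP g i j := rfl
  rw [hpure] at hmain
  simp only [splitM]
  generalize hst : (List.range' (i+1) (j - i - 1)).foldl (fun (st : Int × Int × BMemo) k =>
      let p1m := pointM g st.2.2 i k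
      let p2m := pointM g p1m.2 k j
      let q := p1m.1 * p2m.1
      if st.1 < q then (q, (k : Int), p2m.2) else (st.1, st.2.1, p2m.2)) (0, 0, memo) = st3 at hmain ⊢
  obtain ⟨hm1, hm2, hm3⟩ := hmain
  constructor
  · rw [sepP]
    by_cases hc : (spP g i j).1 < g i j
    · rw [if_pos hc, if_pos (show st3.1 < g i j by rw [hm1]; exact hc)]
    · rw [if_neg hc, if_neg (show ¬ st3.1 < g i j by rw [hm1]; exact hc), hm2]
  · by_cases hc : st3.1 < g i j
    · rw [if_pos hc]
      exact hm3
    · rw [if_neg hc]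
      exact hm3

theorem B_eq (entry : String) (database : List (String × Int)) :
    bottomUpTable_alt entry database =
      mkT entry.toList.length
        (fun i j => if i + 2 ≤ j then sepP (wLook entry.toList database) i j else 0) := by
  set cs := entry.toList with hcs
  set n := cs.length with hn
  set g := wLook cs database with hg
  have hrow : ∀ (i m : Nat) (r0 : List Int) (m0 : BMemo), MemoInv g m0 →
      ((List.range m).foldl (fun (rm : List Int × BMemo) j =>
          if i + 2 ≤ j then
            let am := splitM g rm.2 i j
            (rm.1 ++ [am.1], am.2)
          else (rm.1 ++ [(0 : Int)], rm.2)) (r0, m0)).1 =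
        r0 ++ (List.range m).map (fun j => if i + 2 ≤ j then sepP g i j else 0) ∧
      MemoInv g ((List.range m).foldl (fun (rm : List Int × BMemo) j =>
          if i + 2 ≤ j then
            let am := splitM g rm.2 i j
            (rm.1 ++ [am.1], am.2)
          else (rm.1 ++ [(0 : Int)], rm.2)) (r0, m0)).2 := by
    intro i m
    induction m with
    | zero => intro r0 m0 hm; simpa using hm
    | succ m ih =>
      intro r0 m0 hm
      rw [List.range_succ, List.foldl_append, List.foldl_cons, List.foldl_nil, List.map_append]
      obtain ⟨ih1, ih2⟩ := ih r0 m0 hm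
      by_cases hc : i + 2 ≤ m
      · have hsm := splitM_correct g i m _ ih2
        constructor
        · simp only [if_pos hc, ih1, List.map_cons, List.map_nil, hsm.1, List.append_assoc]
        · simp only [if_pos hc]
          exact hsm.2
      · constructor
        · simp only [if_neg hc, ih1, List.map_cons, List.map_nil, List.append_assoc]
        · simp only [if_neg hc]
          exact ih2
  have htab : ∀ (t : Nat) (acc0 : List (List Int)) (m0 : BMemo), MemoInv g m0 →
      ((List.range t).foldl (fun (acc : List (List Int) × BMemo) i =>
          let rowm := (List.range (n+1)).foldl (fun (rm : List Int × BMemo) j =>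
              if i + 2 ≤ j then
                let am := splitM g rm.2 i j
                (rm.1 ++ [am.1], am.2)
              else (rm.1 ++ [(0 : Int)], rm.2)) ([], acc.2)
          (acc.1 ++ [rowm.1], rowm.2)) (acc0, m0)).1 =
        acc0 ++ (List.range t).map (fun i => (List.range (n+1)).map
          (fun j => if i + 2 ≤ j then sepP g i j else 0)) ∧
      MemoInv g ((List.range t).foldl (fun (acc : List (List Int) × BMemo) i =>
          let rowm := (List.range (n+1)).foldl (fun (rm : List Int × BMemo) j =>
              if i + 2 ≤ j then
                let am := splitM g rm.2 i j
                (rm.1 ++ [am.1], am.2)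
              else (rm.1 ++ [(0 : Int)], rm.2)) ([], acc.2)
          (acc.1 ++ [rowm.1], rowm.2)) (acc0, m0)).2 := by
    intro t
    induction t with
    | zero => intro acc0 m0 hm; simpa using hm
    | succ t ih =>
      intro acc0 m0 hm
      rw [show List.range (t+1) = List.range t ++ [t] from List.range_succ, List.foldl_append,
        List.foldl_cons, List.foldl_nil, List.map_append]
      obtain ⟨ih1, ih2⟩ := ih acc0 m0 hm
      obtain ⟨hr1, hr2⟩ := hrow t (n+1) [] _ ih2
      constructor
      · simp only [ih1, hr1, List.map_cons, List.map_nil, List.nil_append, List.append_assoc]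
      · exact hr2
  have hempty : MemoInv g PySem.Dict.empty := by
    intro a b v hv
    rw [PySem.Dict.get?_empty] at hv
    cases hv
  simp only [bottomUpTable_alt, ← hcs, ← hn, ← hg]
  rw [(htab (n+1) [] PySem.Dict.empty hempty).1, List.nil_append, mkT]

-- ===== VERDICT (by name: the statement is the Claim_ definition above) =====
theorem bottomUpTable_spec : Claim_equal_bottomUpTable := by
  intro entry database _
  unfold Spec_bottomUpTable
  rw [A_eq, B_eq]
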